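-- pv_equiv track=rewrite | github.com/langbridgedev/langbridge | langbridge/runtime/services/dataset_sync/sources.py | relation_parts
-- ===== SOURCE A (Python) =====
-- def relation_parts(relation_name: str) -> tuple[str | None, str | None, str]:
--     parts = [part.strip() for part in str(relation_name or "").split(".") if part.strip()]
--     if not parts:
--         raise ValueError("Dataset table source must not be empty.")
--     if len(parts) == 1:
--         return None, None, parts[0]
--     if len(parts) == 2:
--         return None, parts[0], parts[1]
--     return parts[0], parts[1], parts[2]
-- ===== SOURCE B (Python) =====
-- def relation_parts(relation_name):
--     text = str(relation_name or "")
--     first = second = third = None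
--     count = 0
--     buf = ""
--     for ch in text + ".":
--         if ch == ".":
--             token = buf.strip()
--             buf = ""
--             if token:
--                 if count == 0:
--                     first = token
--                 elif count == 1:
--                     second = token
--                 elif count == 2:
--                     third = token
--                 count += 1
--         else:
--             buf += ch
--     if count == 0:
--         raise ValueError("Dataset table source must not be empty.")
--     if count == 1:
--         return None, None, first
--     if count == 2:
--         return None, first, second
--     return first, second, third
-- ===== Notes on version B (the rewrite author's own statement) =====
-- stated objective: alternative
-- what changed: Replaces A's split/strip/filter list pipeline plus length case ladder with a single character-level state-machine scan that fills three registers and a counter directly, building no intermediate list of parts.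
-- outside the precondition, e.g. on relation_parts('.'): A raises ValueError, B raises ValueError; on relation_parts(' . '): A raises ValueError, B raises ValueError
import Mathlib
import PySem

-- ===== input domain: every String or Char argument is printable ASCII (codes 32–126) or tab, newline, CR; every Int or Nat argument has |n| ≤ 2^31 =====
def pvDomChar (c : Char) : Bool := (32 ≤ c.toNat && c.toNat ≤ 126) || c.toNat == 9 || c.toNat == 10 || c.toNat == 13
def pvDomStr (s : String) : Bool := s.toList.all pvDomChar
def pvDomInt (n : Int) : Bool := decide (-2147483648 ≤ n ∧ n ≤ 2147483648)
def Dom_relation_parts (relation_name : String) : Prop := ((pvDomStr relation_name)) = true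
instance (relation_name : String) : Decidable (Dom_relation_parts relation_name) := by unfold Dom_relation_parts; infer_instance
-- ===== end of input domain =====

-- ===== PORT A =====
-- Header: B replaces A's split/strip/filter pipeline plus length case ladder with a single
-- character-level state-machine scan filling three registers and a counter (objective: alternative).
-- Both raise ValueError when no cleaned part exists (outside Pre_).
-- Note: `str(relation_name or "")` is ported as `relation_name` itself: for a str argument it is
-- the identity ("" -> str("" or "") = "", nonempty s -> str(s) = s).
def relation_parts (relation_name : String) : Option String × Option String × String :=
  let parts := (((PySem.Str.split? relation_name ".").getD []).map
      (fun part => PySem.Str.strip part)).filter (fun part => part ≠ "")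
  match parts with
  | [] => (none, none, "")            -- Python raises ValueError here; excluded by Pre_
  | [a] => (none, none, a)
  | [a, b] => (none, some a, b)
  | a :: b :: c :: _ => (some a, some b, c)

-- ===== PORT B =====
-- The for-loop of Source B: state (buf, first, second, third, count), input the remaining characters.
def rpScan : List Char → List Char → Option String → Option String → Option String → Nat →
    Option String × Option String × Option String × Nat
  | [], _, f, s, t, n => (f, s, t, n)
  | ch :: rest, buf, f, s, t, n =>
    if ch = '.' then
      let token := String.ofList (PySem.Chars.strip buf)   -- buf.strip()
      if token ≠ "" then
        if n = 0 then rpScan rest [] (some token) s t (n + 1)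
        else if n = 1 then rpScan rest [] f (some token) t (n + 1)
        else if n = 2 then rpScan rest [] f s (some token) (n + 1)
        else rpScan rest [] f s t (n + 1)
      else rpScan rest [] f s t n
    else rpScan rest (buf ++ [ch]) f s t n                 -- buf += ch

def relation_parts_alt (relation_name : String) : Option String × Option String × String :=
  match rpScan (relation_name.toList ++ ['.']) [] none none none 0 with
  | (f, s, t, n) =>
    if n = 0 then (none, none, "")  -- Python raises ValueError here; excluded by Pre_
    else if n = 1 then (none, none, f.getD "")
    else if n = 2 then (none, f, s.getD "")
    else (f, s, t.getD "")

-- ===== PRECONDITION & SPEC =====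
-- Pre_ excludes exactly the inputs on which both Pythons raise ValueError: strings whose every
-- character is '.' or whitespace (then no cleaned part survives).
def Pre_relation_parts (relation_name : String) : Prop :=
  (relation_name.toList.any (fun c => c != '.' && !PySem.Chars.isspace c)) = true
instance (relation_name : String) : Decidable (Pre_relation_parts relation_name) := by unfold Pre_relation_parts; infer_instance
def pvWitness_relation_parts : String := "a.b.c"
def Spec_relation_parts (relation_name : String) (out : Option String × Option String × String) : Prop := out = relation_parts_alt relation_name
instance (relation_name : String) (out : Option String × Option String × String) : Decidable (Spec_relation_parts relation_name out) := by unfold Spec_relation_parts; infer_instance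

-- ===== CLAIM (what is proved, stated in full; the proofs are below) =====
def Claim_equal_relation_parts : Prop := ∀ (relation_name : String), Dom_relation_parts relation_name → Pre_relation_parts relation_name → Spec_relation_parts relation_name (relation_parts relation_name)

-- ===== LEMMAS AND PROOFS =====

-- Reference splitter: the raw '.'-separated segments of (cur ++ l), cur being the pending segment.
def rawSplit : List Char → List Char → List (List Char)
  | cur, [] => [cur]
  | cur, c :: rest => if c = '.' then cur :: rawSplit [] rest else rawSplit (cur ++ [c]) rest

-- The cleaned token list of a raw segment list.
def cleanToks (ps : List (List Char)) : List String :=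
  (ps.map (fun p => String.ofList (PySem.Chars.strip p))).filter (fun x => x ≠ "")

-- One register-filling step per token, as rpScan performs it.
def feed : List String → Option String × Option String × Option String × Nat →
    Option String × Option String × Option String × Nat
  | [], st => st
  | tok :: ts, (f, s, t, n) =>
    if n = 0 then feed ts (some tok, s, t, n + 1)
    else if n = 1 then feed ts (f, some tok, t, n + 1)
    else if n = 2 then feed ts (f, s, some tok, n + 1)
    else feed ts (f, s, t, n + 1)

-- rpScan consumes (l ++ ['.']) from pending buffer buf exactly as feeding the cleaned tokens
-- of rawSplit buf l into the registers.
theorem rpScan_eq_feed : ∀ (l buf : List Char) (f s t : Option String) (n : Nat),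
    rpScan (l ++ ['.']) buf f s t n = feed (cleanToks (rawSplit buf l)) (f, s, t, n) := by
  intro l
  induction l with
  | nil =>
    intro buf f s t n
    simp only [List.nil_append, rpScan, rawSplit, cleanToks, List.map, List.filter]
    by_cases h : String.ofList (PySem.Chars.strip buf) = ""
    · simp [h, feed]
    · simp [h, feed]
  | cons c rest ih =>
    intro buf f s t n
    by_cases hc : c = '.'
    · subst hc
      simp only [List.cons_append, rpScan, if_pos rfl, rawSplit, cleanToks, List.map, List.filter]
      by_cases h : String.ofList (PySem.Chars.strip buf) = ""
      · simp [h, ih, cleanToks, feed]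
      · simp [h, ih, cleanToks, feed]
    · simp only [List.cons_append, rpScan, if_neg hc, rawSplit, if_neg hc]
      exact ih (buf ++ [c]) f s t n

-- PySem.Chars.splitOn.go with separator ['.'] is rawSplit (up to the accumulator), given fuel.
theorem splitOn_go_eq_rawSplit : ∀ (fuel : Nat) (l cur : List Char) (acc : List (List Char)),
    l.length < fuel →
    PySem.Chars.splitOn.go ['.'] fuel l cur acc = acc.reverse ++ rawSplit cur.reverse l := by
  intro fuel
  induction fuel with
  | zero => intro l cur acc h; omega
  | succ m ih =>
    intro l cur acc h
    cases l with
    | nil => simp [PySem.Chars.splitOn.go, rawSplit]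
    | cons c rest =>
      rw [PySem.Chars.splitOn.go]
      by_cases hc : c = '.'
      · rw [if_pos (by simp [List.isPrefixOf, hc])]
        rw [show List.drop ['.'].length (c :: rest) = rest from by simp]
        rw [ih rest [] (cur.reverse :: acc) (by simp at h ⊢; omega)]
        simp [rawSplit, hc]
      · rw [if_neg (by simp [List.isPrefixOf]; exact fun h => hc h.symm)]
        rw [ih rest (c :: cur) acc (by simp at h ⊢; omega)]
        simp [rawSplit, hc]

-- A's cleaned parts list is cleanToks of the raw segments.
theorem partsA_eq (s : String) :
    (((PySem.Str.split? s ".").getD []).map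
      (fun part => PySem.Str.strip part)).filter (fun part => part ≠ "") =
    cleanToks (rawSplit [] s.toList) := by
  have hsplit : PySem.Str.split? s "." = some ((PySem.Chars.splitOn s.toList ['.']).map String.ofList) := by
    simp [PySem.Str.split?, PySem.Chars.split?]
  rw [hsplit]
  have hgo : PySem.Chars.splitOn s.toList ['.'] = rawSplit [] s.toList := by
    unfold PySem.Chars.splitOn
    simpa using splitOn_go_eq_rawSplit (s.toList.length + 1) s.toList [] [] (by omega)
  rw [hgo]
  unfold cleanToks
  simp only [Option.getD_some, List.map_map]
  congr 1
  apply List.map_congr_left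
  intro p _
  simp [PySem.Str.strip]

-- Once three registers are filled, feeding only increments the counter.
theorem feed_full : ∀ (ts : List String) (f s t : Option String) (n : Nat), 3 ≤ n →
    feed ts (f, s, t, n) = (f, s, t, n + ts.length) := by
  intro ts
  induction ts with
  | nil => intro f s t n h; simp [feed]
  | cons x xs ih =>
    intro f s t n h
    simp only [feed]
    rw [if_neg (by omega), if_neg (by omega), if_neg (by omega), ih _ _ _ _ (by omega)]
    simp; omega

-- Every element of acc ends up in the result of splitOn.go.
theorem go_mem_acc (sep : List Char) (fuel : Nat) : ∀ (l cur : List Char) (acc : List (List Char)) (p : List Char),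
    p ∈ acc → p ∈ PySem.Chars.splitOn.go sep fuel l cur acc := by
  induction fuel with
  | zero => intro l cur acc p hp; simp [PySem.Chars.splitOn.go, hp]
  | succ n ih =>
    intro l cur acc p hp
    cases l with
    | nil => simp [PySem.Chars.splitOn.go, hp]
    | cons c rest =>
      rw [PySem.Chars.splitOn.go]
      split
      · exact ih _ _ _ _ (by simp [hp])
      · exact ih _ _ _ _ hp

-- A non-separator character of the remaining input (or of the current piece) lands in some result piece.
theorem go_mem_char (fuel : Nat) : ∀ (l cur : List Char) (acc : List (List Char)) (c : Char),
    l.length < fuel → ((c ∈ l ∧ c ≠ '.') ∨ c ∈ cur) →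
    ∃ p ∈ PySem.Chars.splitOn.go ['.'] fuel l cur acc, c ∈ p := by
  induction fuel with
  | zero => intro l cur acc c h; exact absurd h (by omega)
  | succ n ih =>
    intro l cur acc c hlen hc
    cases l with
    | nil =>
      refine ⟨cur.reverse, by simp [PySem.Chars.splitOn.go], ?_⟩
      rcases hc with ⟨h, _⟩ | h
      · simp at h
      · simpa using h
    | cons d rest =>
      rw [PySem.Chars.splitOn.go]
      by_cases hd : d = '.'
      · rw [if_pos (by simp [List.isPrefixOf, hd])]
        rcases hc with ⟨hcl, hne⟩ | hcur
        · have hcr : c ∈ rest := by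
            rcases List.mem_cons.mp hcl with rfl | h
            · exact absurd hd hne
            · exact h
          have := ih rest [] (cur.reverse :: acc) c (by simp at hlen ⊢; omega) (Or.inl ⟨hcr, hne⟩)
          simpa using this
        · exact ⟨cur.reverse, go_mem_acc _ n _ _ _ _ (by simp), by simpa using hcur⟩
      · rw [if_neg (by simp [List.isPrefixOf]; exact fun h => hd h.symm)]
        refine ih rest (d :: cur) acc c (by simp at hlen ⊢; omega) ?_
        rcases hc with ⟨hcl, hne⟩ | hcur
        · rcases List.mem_cons.mp hcl with rfl | h
          · exact Or.inr (by simp)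
          · exact Or.inl ⟨h, hne⟩
        · exact Or.inr (List.mem_cons_of_mem _ hcur)

theorem splitOn_mem_char (s : List Char) (c : Char) (hc : c ∈ s) (hne : c ≠ '.') :
    ∃ p ∈ PySem.Chars.splitOn s ['.'], c ∈ p := by
  unfold PySem.Chars.splitOn
  exact go_mem_char (s.length + 1) s [] [] c (by omega) (Or.inl ⟨hc, hne⟩)

theorem strip_ne_nil (p : List Char) (c : Char) (hc : c ∈ p) (hs : PySem.Chars.isspace c = false) :
    PySem.Chars.strip p ≠ [] := by
  intro h
  have hcl : c ∈ PySem.Chars.lstrip p := by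
    unfold PySem.Chars.lstrip
    rw [← List.takeWhile_append_dropWhile (p := PySem.Chars.isspace) (l := p)] at hc
    rcases List.mem_append.mp hc with h1 | h2
    · exact absurd (List.mem_takeWhile_imp h1) (by simp [hs])
    · exact h2
  unfold PySem.Chars.strip PySem.Chars.rstrip at h
  have hall := List.dropWhile_eq_nil_iff.mp (List.reverse_eq_nil_iff.mp h)
  have := hall c (by simpa using hcl)
  simp [hs] at this

-- Under Pre_, the cleaned parts list (of A) is nonempty: the raise branch is unreachable.
theorem parts_ne_nil (s : String)
    (h : (s.toList.any (fun c => c != '.' && !PySem.Chars.isspace c)) = true) :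
    (((PySem.Str.split? s ".").getD []).map
      (fun part => PySem.Str.strip part)).filter (fun part => part ≠ "") ≠ [] := by
  rcases List.any_eq_true.mp h with ⟨c, hc, hprop⟩
  have hne : c ≠ '.' := by simpa using (Bool.and_elim_left hprop)
  have hsp : PySem.Chars.isspace c = false := by
    have := Bool.and_elim_right hprop; simpa using this
  rcases splitOn_mem_char s.toList c hc hne with ⟨p, hp, hcp⟩
  have hsplit : PySem.Str.split? s "." = some ((PySem.Chars.splitOn s.toList ['.']).map String.ofList) := by
    simp [PySem.Str.split?, PySem.Chars.split?]
  intro hnil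
  rw [List.filter_eq_nil_iff] at hnil
  have hmem : PySem.Str.strip (String.ofList p) ∈
      ((PySem.Str.split? s ".").getD []).map (fun part => PySem.Str.strip part) := by
    rw [hsplit]
    exact List.mem_map_of_mem (List.mem_map_of_mem hp)
  have := hnil _ hmem
  simp only [decide_eq_true_eq, Decidable.not_not] at this
  have htl := congrArg String.toList this
  rw [PySem.Str.toList_strip] at htl
  simp at htl
  exact strip_ne_nil p c hcp hsp htl

-- ===== VERDICT (by name: the statement is the Claim_ definition above) =====
theorem relation_parts_spec : Claim_equal_relation_parts := by
  intro s _ hpre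
  unfold Spec_relation_parts relation_parts relation_parts_alt
  have hne := parts_ne_nil s hpre
  rw [partsA_eq] at hne
  rw [partsA_eq, rpScan_eq_feed]
  generalize h : cleanToks (rawSplit [] s.toList) = parts at hne ⊢
  match parts with
  | [] => exact absurd rfl hne
  | [a] => simp [feed]
  | [a, b] => simp [feed]
  | a :: b :: c :: rest =>
    simp only [feed]
    norm_num
    rw [feed_full rest (some a) (some b) (some c) 3 (by omega)]
    split_ifs with h0 h1 h2
    · exact absurd h0 (by simp)
    · exact absurd h1 (by simp; omega)
    · exact absurd h2 (by simp; omega)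
    · simp
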